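-- pv_equiv track=rewrite | github.com/eb-k8s/kubeaver | backend/ansible/kubespray_process.py | insert_line_after_pattern
-- ===== SOURCE A (Python) =====
-- def insert_line_after_pattern(lines, pattern, new_line, nth_line=0):
--     """
--     Insert a new line after the nth line following the line containing the pattern.
--
--     :param lines: List of lines in the file.
--     :param pattern: Pattern to search for.
--     :param nth_line: The nth line after the pattern where the new line should be inserted.
--     :param new_line: New line to insert.
--     :return: Modified list of lines.
--     """
--     new_lines = []
--     found_pattern = False
--     count_after_pattern = 0
--
--     for line in lines:
--         if found_pattern and count_after_pattern < nth_line: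
--             count_after_pattern += 1
--
--         if pattern in line:
--             found_pattern = True
--
--         new_lines.append(line)
--
--         if found_pattern and count_after_pattern == nth_line:
--             new_lines.append(new_line + '\n')
--             count_after_pattern += 1  # Increment to avoid inserting again on the next iteration
--
--     return new_lines
-- ===== SOURCE B (Python) =====
-- def insert_line_after_pattern(lines, pattern, new_line, nth_line=0):
--     """Locate-then-slice re-implementation: find the first line containing
--     pattern, then splice the new line in after position first+nth_line."""
--     first = next((i for i, line in enumerate(lines) if pattern in line), None)
--     if first is None or nth_line < 0 or first + nth_line >= len(lines):
--         return list(lines)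
--     t = first + nth_line
--     return lines[:t + 1] + [new_line + '\n'] + lines[t + 1:]
-- ===== Notes on version B (the rewrite author's own statement) =====
-- stated objective: simpler
-- what changed: Replaces A's accumulate-while-scanning pass with flag and counter state by a locate-then-slice structure: find the first matching index, then splice the new line in (or return an unchanged copy) with slices.
import Mathlib
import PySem

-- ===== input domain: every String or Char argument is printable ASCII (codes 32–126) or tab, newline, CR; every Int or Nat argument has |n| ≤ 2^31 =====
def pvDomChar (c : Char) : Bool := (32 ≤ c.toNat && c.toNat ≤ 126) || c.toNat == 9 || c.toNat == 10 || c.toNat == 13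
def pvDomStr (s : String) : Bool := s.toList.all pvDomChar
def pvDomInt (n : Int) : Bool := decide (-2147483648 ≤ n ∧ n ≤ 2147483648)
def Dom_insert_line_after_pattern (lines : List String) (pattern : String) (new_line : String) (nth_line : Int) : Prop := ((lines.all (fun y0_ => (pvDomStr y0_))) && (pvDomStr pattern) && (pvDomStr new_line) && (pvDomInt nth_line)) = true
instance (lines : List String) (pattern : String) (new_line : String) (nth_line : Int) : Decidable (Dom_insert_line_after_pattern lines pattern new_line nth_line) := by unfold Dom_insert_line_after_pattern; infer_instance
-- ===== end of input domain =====

-- B replaces A's accumulate-while-scanning pass (flag + counter state) by a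
-- locate-then-slice decomposition; objective: simpler, same return value everywhere.

-- ===== PORT A =====
-- one iteration of A's for-loop; state = (new_lines, found_pattern, count_after_pattern)
def pvStepA (pattern : String) (new_line : String) (nth_line : Int)
    (st : List String × Bool × Int) (line : String) : List String × Bool × Int :=
  let count1 := if st.2.1 && decide (st.2.2 < nth_line) then st.2.2 + 1 else st.2.2
  let found1 := st.2.1 || PySem.Str.isIn pattern line
  let acc1 := st.1 ++ [line]
  if found1 && decide (count1 = nth_line) then (acc1 ++ [new_line ++ "\n"], found1, count1 + 1)
  else (acc1, found1, count1)

def insert_line_after_pattern (lines : List String) (pattern : String) (new_line : String) (nth_line : Int) : List String :=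
  (lines.foldl (pvStepA pattern new_line nth_line) ([], false, 0)).1

-- ===== PORT B =====
def insert_line_after_pattern_alt (lines : List String) (pattern : String) (new_line : String) (nth_line : Int) : List String :=
  match lines.findIdx? (fun line => PySem.Str.isIn pattern line) with
  | none => lines
  | some i =>
    if nth_line < 0 ∨ (lines.length : Int) ≤ (i : Int) + nth_line then lines
    else
      let t := i + nth_line.toNat
      lines.take (t + 1) ++ [new_line ++ "\n"] ++ lines.drop (t + 1)

-- ===== PRECONDITION & SPEC =====
def Spec_insert_line_after_pattern (lines : List String) (pattern : String) (new_line : String) (nth_line : Int) (out : List String) : Prop := out = insert_line_after_pattern_alt lines pattern new_line nth_line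
instance (lines : List String) (pattern : String) (new_line : String) (nth_line : Int) (out : List String) : Decidable (Spec_insert_line_after_pattern lines pattern new_line nth_line out) := by unfold Spec_insert_line_after_pattern; infer_instance

-- ===== CLAIM (what is proved, stated in full; the proofs are below) =====
def Claim_equal_insert_line_after_pattern : Prop := ∀ (lines : List String) (pattern : String) (new_line : String) (nth_line : Int), Dom_insert_line_after_pattern lines pattern new_line nth_line → Spec_insert_line_after_pattern lines pattern new_line nth_line (insert_line_after_pattern lines pattern new_line nth_line)

-- ===== LEMMAS AND PROOFS =====

-- After the insertion has happened (count > nth_line), A's loop only copies the remaining lines.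
theorem pvFoldDone (pattern new_line : String) (nth : Int) (ls : List String) :
    ∀ (acc : List String) (f : Bool) (c : Int), nth < c →
    (ls.foldl (pvStepA pattern new_line nth) (acc, f, c)).1 = acc ++ ls := by
  induction ls with
  | nil => intro acc f c _; simp
  | cons h t ih =>
    intro acc f c hc
    have h1 : ¬ (c < nth) := by omega
    have h2 : ¬ (c = nth) := by omega
    rw [List.foldl_cons,
      show pvStepA pattern new_line nth (acc, f, c) h
          = (acc ++ [h], f || PySem.Str.isIn pattern h, c) from by simp [pvStepA, h1, h2]]
    rw [ih _ _ _ hc]; simp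

-- While counting (pattern already found, k more lines until the target), A's loop inserts
-- the new line right after the k-th remaining line, if it exists.
theorem pvFoldCnt (pattern new_line : String) (nth : Int) (ls : List String) :
    ∀ (acc : List String) (c : Int) (k : Nat), 0 < k → c + (k : Int) = nth →
    (ls.foldl (pvStepA pattern new_line nth) (acc, true, c)).1 =
      if k ≤ ls.length then acc ++ ls.take k ++ [new_line ++ "\n"] ++ ls.drop k else acc ++ ls := by
  induction ls with
  | nil =>
    intro acc c k hk _
    rw [if_neg (by simp; omega)]
    simp
  | cons h t ih =>
    intro acc c k hk hsum
    have hlt : c < nth := by omega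
    by_cases h1 : k = 1
    · subst h1
      have he : c + 1 = nth := by omega
      rw [List.foldl_cons,
        show pvStepA pattern new_line nth (acc, true, c) h
            = (acc ++ [h] ++ [new_line ++ "\n"], true, c + 1 + 1) from by simp [pvStepA, hlt, he]]
      rw [pvFoldDone _ _ _ _ _ _ _ (by omega)]
      rw [if_pos (by simp)]
      simp
    · have hne : ¬ (c + 1 = nth) := by omega
      rw [List.foldl_cons,
        show pvStepA pattern new_line nth (acc, true, c) h
            = (acc ++ [h], true, c + 1) from by simp [pvStepA, hlt, hne]]
      rw [ih _ _ (k - 1) (by omega) (by omega)]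
      obtain ⟨k', rfl⟩ : ∃ k', k = k' + 1 := ⟨k - 1, by omega⟩
      simp only [Nat.add_sub_cancel, List.length_cons, List.take_succ_cons, List.drop_succ_cons,
        Nat.add_le_add_iff_right]
      split_ifs <;> simp

-- B's closed form commutes with prepending a non-matching line.
theorem pvAltCons (pattern new_line : String) (nth : Int) (h : String) (t : List String)
    (hp : PySem.Str.isIn pattern h = false) :
    insert_line_after_pattern_alt (h :: t) pattern new_line nth =
      h :: insert_line_after_pattern_alt t pattern new_line nth := by
  unfold insert_line_after_pattern_alt
  rw [List.findIdx?_cons]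
  simp only [hp, Bool.false_eq_true, if_false]
  cases hfi : t.findIdx? (fun line => PySem.Str.isIn pattern line) with
  | none => simp
  | some i =>
    simp only [Option.map_some]
    have hcond : (nth < 0 ∨ (((h :: t).length : Int) ≤ ((i + 1 : Nat) : Int) + nth)) ↔
        (nth < 0 ∨ ((t.length : Int) ≤ (i : Int) + nth)) := by
      simp only [List.length_cons]; push_cast; omega
    split_ifs with hA hB hB
    · rfl
    · exact absurd (hcond.mp hA) hB
    · exact absurd (hcond.mpr hB) hA
    · simp only [show i + 1 + nth.toNat + 1 = (i + nth.toNat + 1) + 1 by omega,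
        List.take_succ_cons, List.drop_succ_cons, List.cons_append]

-- The scanning phase (pattern not yet found, counter 0) produces B's result.
theorem pvFoldScan (pattern new_line : String) (nth : Int) (ls : List String) :
    ∀ (acc : List String),
    (ls.foldl (pvStepA pattern new_line nth) (acc, false, 0)).1 =
      acc ++ insert_line_after_pattern_alt ls pattern new_line nth := by
  induction ls with
  | nil => intro acc; simp [insert_line_after_pattern_alt]
  | cons h t ih =>
    intro acc
    by_cases hp : PySem.Str.isIn pattern h = true
    · have hpc : PySem.Chars.isIn pattern.toList h.toList = true := by simpa using hp
      have halt0 : insert_line_after_pattern_alt (h :: t) pattern new_line nth =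
          if nth < 0 ∨ (((h :: t).length : Int) ≤ ((0 : Nat) : Int) + nth) then h :: t
          else (h :: t).take (0 + nth.toNat + 1) ++ [new_line ++ "\n"] ++
               (h :: t).drop (0 + nth.toNat + 1) := by
        unfold insert_line_after_pattern_alt
        rw [List.findIdx?_cons]
        simp only [hp, if_true]
      rcases lt_trichotomy nth 0 with hn | hn | hn
      · rw [List.foldl_cons,
          show pvStepA pattern new_line nth (acc, false, 0) h = (acc ++ [h], true, 0) from by
            simp [pvStepA, hpc, show ¬ ((0 : Int) = nth) by omega]]
        rw [pvFoldDone _ _ _ _ _ _ _ hn]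
        rw [halt0, if_pos (Or.inl hn)]
        simp
      · subst hn
        rw [List.foldl_cons,
          show pvStepA pattern new_line (0 : Int) (acc, false, 0) h
              = (acc ++ [h] ++ [new_line ++ "\n"], true, 1) from by simp [pvStepA, hpc]]
        rw [pvFoldDone _ _ _ _ _ _ _ (by omega)]
        rw [halt0, if_neg (by simp only [List.length_cons, not_or]; refine ⟨by omega, ?_⟩; push_cast; omega)]
        simp
      · rw [List.foldl_cons,
          show pvStepA pattern new_line nth (acc, false, 0) h = (acc ++ [h], true, 0) from by
            simp [pvStepA, hpc, show ¬ ((0 : Int) = nth) by omega]]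
        rw [pvFoldCnt _ _ _ _ _ _ nth.toNat (by omega) (by omega)]
        rw [halt0]
        by_cases hkl : nth.toNat ≤ t.length
        · rw [if_pos hkl, if_neg (by simp only [List.length_cons, not_or]; refine ⟨by omega, ?_⟩; push_cast; omega)]
          simp [List.take_succ_cons, List.drop_succ_cons]
        · rw [if_neg hkl, if_pos (by right; simp only [List.length_cons]; push_cast; omega)]
          simp
    · have hp' : PySem.Str.isIn pattern h = false := by simpa using hp
      have hpc' : PySem.Chars.isIn pattern.toList h.toList = false := by simpa using hp
      rw [List.foldl_cons,
        show pvStepA pattern new_line nth (acc, false, 0) h = (acc ++ [h], false, 0) from by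
          simp [pvStepA, hpc']]
      rw [ih, pvAltCons _ _ _ _ _ hp']
      simp

-- ===== VERDICT (by name: the statement is the Claim_ definition above) =====
theorem insert_line_after_pattern_spec : Claim_equal_insert_line_after_pattern := by
  intro lines pattern new_line nth_line _
  unfold Spec_insert_line_after_pattern insert_line_after_pattern
  rw [pvFoldScan]
  simp
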